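-- pv_equiv track=rewrite | github.com/PalRob/rdp | easy/dp_341_easy.py | get_repetitions
-- ===== SOURCE A (Python) =====
-- from collections import Counter
--
-- def get_substrings(input_str):
--     """Get all substrings of len 2 or more of given string."""
--     substrings = []
--     for j in range(1, len(input_str)):
--         for i in range(j):
--             substrings.append(input_str[i:j+1])
--     return substrings
--
-- def get_repetitions(input_str):
--     """Count all repeting patterns of 2 or more characters in given string.
--     """
--     # TODO: What if input_str is 2 characters or less?
--     substrings = get_substrings(input_str)
--     repetitions = Counter(substrings)
--     keys = list(repetitions.keys())
--     for k in keys: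
--         if repetitions[k] < 2:
--             del repetitions[k]
--     return repetitions
-- ===== SOURCE B (Python) =====
-- from collections import Counter
--
-- def get_repetitions(input_str):
--     """Count all repeting patterns of 2 or more characters in given string.
--     """
--     substrings = [input_str[i:j + 1]
--                   for j in range(1, len(input_str)) for i in range(j)]
--     # count by sorting: equal substrings become adjacent maximal runs
--     counts = {}
--     run_key, run_len = None, 0
--     for s in sorted(substrings):
--         if s == run_key:
--             run_len += 1
--         else:
--             if run_len:
--                 counts[run_key] = run_len
--             run_key, run_len = s, 1
--     if run_len:
--         counts[run_key] = run_len
--     # emit the repeated substrings in first-occurrence order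
--     result = Counter()
--     for s in substrings:
--         if counts[s] >= 2:
--             result[s] = counts[s]
--     return result
-- ===== Notes on version B (the rewrite author's own statement) =====
-- stated objective: alternative
-- what changed: B replaces A's hash counting (Counter then deleting count<2 keys) by a sort-then-scan strategy: it sorts the list of substrings, counts each maximal run of equal substrings with a run-length loop, and then emits the count>=2 substrings in first-occurrence order.
import Mathlib
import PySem

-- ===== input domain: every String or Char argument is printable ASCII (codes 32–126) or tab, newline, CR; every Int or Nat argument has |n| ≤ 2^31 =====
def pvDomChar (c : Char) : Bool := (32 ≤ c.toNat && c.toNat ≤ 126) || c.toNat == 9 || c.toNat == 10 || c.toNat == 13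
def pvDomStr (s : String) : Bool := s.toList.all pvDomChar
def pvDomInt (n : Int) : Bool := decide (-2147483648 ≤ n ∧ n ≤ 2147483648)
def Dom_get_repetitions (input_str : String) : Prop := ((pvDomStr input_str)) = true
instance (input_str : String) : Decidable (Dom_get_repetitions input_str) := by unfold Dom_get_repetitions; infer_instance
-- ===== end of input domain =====

-- B counts by sorting the substrings and run-length scanning the runs instead of A's
-- Counter-then-delete hash counting; same return value.

-- ===== PORT A =====
def get_substringsA (input_str : String) : List String :=
  (PySem.List.pyRange 1 (PySem.Str.len input_str)).foldl
    (fun subs j =>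
      (PySem.List.pyRange 0 j).foldl
        (fun subs i => subs ++ [PySem.Str.slice input_str (some i) (some (j + 1))]) subs)
    []

def get_repetitions (input_str : String) : List (String × Int) :=
  let substrings := get_substringsA input_str
  let repetitions := PySem.Dict.counter substrings
  let keys := repetitions.keys
  (keys.foldl (fun d k => if d.getD k 0 < 2 then d.erase k else d) repetitions).items

-- ===== PORT B =====
-- one run-length step of B's loop over the sorted substrings
def rlStep (st : PySem.Dict String Int × Option String × Int) (s : String) :
    PySem.Dict String Int × Option String × Int :=
  match st with
  | (counts, run_key, run_len) =>
    if some s == run_key then (counts, run_key, run_len + 1)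
    else
      ((if run_len ≠ 0 then
          match run_key with
          | some k => counts.insert k run_len
          | none => counts
        else counts), some s, 1)

-- the flush after the loop ('if run_len: counts[run_key] = run_len')
def rlFlush (st : PySem.Dict String Int × Option String × Int) : PySem.Dict String Int :=
  match st with
  | (counts, run_key, run_len) =>
    if run_len ≠ 0 then
      match run_key with
      | some k => counts.insert k run_len
      | none => counts
    else counts

def get_repetitions_alt (input_str : String) : List (String × Int) :=
  let substrings :=
    (PySem.List.pyRange 1 (PySem.Str.len input_str)).flatMap
      (fun j => (PySem.List.pyRange 0 j).map
        (fun i => PySem.Str.slice input_str (some i) (some (j + 1))))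
  let counts :=
    rlFlush ((PySem.List.sorted substrings (fun s => s) false).foldl rlStep
      (PySem.Dict.empty, none, 0))
  let result :=
    substrings.foldl
      (fun d s => if 2 ≤ counts.getD s 0 then d.insert s (counts.getD s 0) else d)
      PySem.Dict.empty
  result.items

-- ===== PRECONDITION & SPEC =====
def Spec_get_repetitions (input_str : String) (out : List (String × Int)) : Prop := out = get_repetitions_alt input_str
instance (input_str : String) (out : List (String × Int)) : Decidable (Spec_get_repetitions input_str out) := by unfold Spec_get_repetitions; infer_instance

-- ===== CLAIM (what is proved, stated in full; the proofs are below) =====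
def Claim_equal_get_repetitions : Prop := ∀ (input_str : String), Dom_get_repetitions input_str → Spec_get_repetitions input_str (get_repetitions input_str)

-- ===== LEMMAS AND PROOFS =====

-- lookup skips a prefix whose keys do not contain k
lemma get?_mk_append_of_not_mem {ν : Type} (P L : List (String × ν)) (k : String)
    (h : k ∉ P.map Prod.fst) :
    (PySem.Dict.mk (P ++ L)).get? k = (PySem.Dict.mk L).get? k := by
  induction P with
  | nil => rfl
  | cons p P ih =>
      have hne : p.1 ≠ k := by
        intro hk; exact h (by simp [hk])
      rw [List.cons_append, PySem.Dict.get?_mk_cons]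
      simp only [beq_iff_eq, hne, if_false]
      exact ih (fun hk => h (List.mem_cons_of_mem _ hk))

-- A's deletion loop over the keys of a dict keeps exactly the entries with value ≥ 2,
-- in order; P is the already-processed (kept) prefix.
lemma eraseLoop (L : List (String × Int)) :
    ∀ P : List (String × Int),
      (∀ k ∈ L.map Prod.fst, k ∉ P.map Prod.fst) →
      (L.map Prod.fst).Nodup →
      (L.map Prod.fst).foldl (fun d k => if d.getD k 0 < 2 then d.erase k else d)
          (PySem.Dict.mk (P ++ L))
        = PySem.Dict.mk (P ++ L.filter (fun p => !decide (p.2 < 2))) := by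
  induction L with
  | nil => intro P _ _; simp
  | cons p L ih =>
      intro P hdisj hnd
      have hPk : p.1 ∉ P.map Prod.fst := hdisj p.1 (by simp)
      have hnd' : (p.1 :: L.map Prod.fst).Nodup := by simpa using hnd
      have hLk : p.1 ∉ L.map Prod.fst := (List.nodup_cons.mp hnd').1
      have hget : (PySem.Dict.mk (P ++ p :: L)).getD p.1 0 = p.2 := by
        rw [PySem.Dict.getD, get?_mk_append_of_not_mem _ _ _ hPk,
            PySem.Dict.get?_mk_cons]
        simp
      simp only [List.map_cons, List.foldl_cons, hget]
      by_cases h : p.2 < 2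
      · rw [if_pos h]
        have herase : (PySem.Dict.mk (P ++ p :: L)).erase p.1 = PySem.Dict.mk (P ++ L) := by
          apply PySem.Dict.ext
          simp only [PySem.Dict.erase, List.filter_append, List.filter_cons]
          have hP : P.filter (fun q => !q.1 == p.1) = P := by
            apply List.filter_eq_self.mpr
            intro q hq
            simp only [Bool.not_eq_eq_eq_not, Bool.not_true, beq_eq_false_iff_ne, ne_eq]
            intro hqk
            exact hPk (by simpa [hqk] using List.mem_map_of_mem (f := Prod.fst) hq)
          have hL : L.filter (fun q => !q.1 == p.1) = L := by
            apply List.filter_eq_self.mpr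
            intro q hq
            simp only [Bool.not_eq_eq_eq_not, Bool.not_true, beq_eq_false_iff_ne, ne_eq]
            intro hqk
            exact hLk (by simpa [hqk] using List.mem_map_of_mem (f := Prod.fst) hq)
          simp [hP, hL]
        rw [herase, ih P (fun k hk => hdisj k (by simp [hk]))
              (List.nodup_cons.mp hnd').2]
        have : (p :: L).filter (fun q => !decide (q.2 < 2)) =
            L.filter (fun q => !decide (q.2 < 2)) := by
          simp [List.filter_cons]; omega
        rw [this]
      · rw [if_neg h]
        have hre : P ++ p :: L = (P ++ [p]) ++ L := by simp
        rw [hre, ih (P ++ [p])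
              (fun k hk => by
                simp only [List.map_append, List.mem_append, List.map_cons, List.map_nil,
                  List.mem_singleton, not_or]
                exact ⟨hdisj k (by simp [hk]), by
                  intro hkp; exact hLk (hkp ▸ hk)⟩)
              (List.nodup_cons.mp hnd').2]
        have : (p :: L).filter (fun q => !decide (q.2 < 2)) =
            p :: L.filter (fun q => !decide (q.2 < 2)) := by
          simp [List.filter_cons]; omega
        rw [this]
        simp

-- the common substring enumeration, as a flat list
def subsList (input_str : String) : List String :=
  (PySem.List.pyRange 1 (PySem.Str.len input_str)).flatMap
    (fun j => (PySem.List.pyRange 0 j).map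
      (fun i => PySem.Str.slice input_str (some i) (some (j + 1))))

lemma substringsA_eq (input_str : String) :
    get_substringsA input_str = subsList input_str := by
  unfold get_substringsA subsList
  simp only [PySem.List.foldl_append_singleton_eq_map]
  rw [PySem.List.foldl_append_eq_flatMap]
  simp

-- B's run-length loop, started in the middle of a run of k of current length m ≥ 1,
-- over a sorted tail xs all ≥ k, computes every multiplicity.
lemma rlLoop (v : String) :
    ∀ (xs : List String) (counts : PySem.Dict String Int) (k : String) (m : Int),
      xs.Pairwise (· ≤ ·) → (∀ y ∈ xs, k ≤ y) → 1 ≤ m →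
      (rlFlush (xs.foldl rlStep (counts, some k, m))).getD v 0 =
        if v = k then m + xs.count k
        else if v ∈ xs then (xs.count v : Int)
        else counts.getD v 0 := by
  intro xs
  induction xs with
  | nil =>
      intro counts k m _ _ hm
      have hm0 : m ≠ 0 := by omega
      simp [rlFlush, hm0, PySem.Dict.getD_insert]
  | cons s rest ih =>
      intro counts k m hpw hge hm
      have hrest : rest.Pairwise (· ≤ ·) := (List.pairwise_cons.mp hpw).2
      have hall : ∀ y ∈ rest, s ≤ y := (List.pairwise_cons.mp hpw).1
      have hks : k ≤ s := hge s (by simp)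
      by_cases hsk : s = k
      · have hbeq : (some s == some k) = true := by simp [hsk]
        rw [List.foldl_cons]
        rw [show rlStep (counts, some k, m) s = (counts, some k, m + 1) by
          simp [rlStep, hbeq]]
        rw [ih counts k (m + 1) hrest (fun y hy => le_trans hks (hsk ▸ hall y hy)) (by omega)]
        subst hsk
        by_cases hvk : v = s
        · simp [hvk, List.count_cons]; ring
        · simp [hvk, List.mem_cons, Ne.symm hvk, List.count_cons]
      · have hbeq : (some s == some k) = false := by simp [hsk]
        have hm0 : m ≠ 0 := by omega
        rw [List.foldl_cons]
        rw [show rlStep (counts, some k, m) s = (counts.insert k m, some s, 1) by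
          simp [rlStep, hbeq, hm0]]
        rw [ih (counts.insert k m) s 1 hrest hall (by omega)]
        have hklt : k < s := lt_of_le_of_ne hks (Ne.symm hsk)
        have hknr : k ∉ rest := fun h => absurd (hall k h) (by exact not_le.mpr hklt)
        by_cases hvk : v = k
        · subst hvk
          have hnr : v ∉ rest := hknr
          simp [hsk, Ne.symm hsk, hnr, List.count_eq_zero.mpr hnr,
            PySem.Dict.getD_insert]
        · by_cases hvs : v = s
          · subst hvs
            simp [hvk, List.count_cons, add_comm]
          · simp [hvk, hvs, Ne.symm hvs, List.mem_cons, List.count_cons,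
              PySem.Dict.getD_insert]

-- B's counts dict reads back the multiplicity of every substring
lemma countsB_getD (S : List String) (v : String) :
    (rlFlush ((PySem.List.sorted S (fun s => s) false).foldl rlStep
        (PySem.Dict.empty, none, 0))).getD v 0
      = if v ∈ S then (S.count v : Int) else 0 := by
  have hperm : (PySem.List.sorted S (fun s => s) false).Perm S :=
    PySem.List.sorted_perm S (fun s => s) false
  have hpw : (PySem.List.sorted S (fun s => s) false).Pairwise (fun a b => a ≤ b) :=
    PySem.List.sorted_pairwise S (fun s => s)
  rcases hE : PySem.List.sorted S (fun s => s) false with _ | ⟨s, rest⟩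
  · have hS : S = [] := by
      have := hperm; rw [hE] at this; exact this.symm.eq_nil
    subst hS
    simp [rlFlush, PySem.Dict.getD_empty]
  · rw [hE] at hperm hpw
    have hpr := List.pairwise_cons.mp hpw
    rw [List.foldl_cons]
    rw [show rlStep (PySem.Dict.empty, none, 0) s = (PySem.Dict.empty, some s, 1) by
      simp [rlStep]]
    rw [rlLoop v rest PySem.Dict.empty s 1 hpr.2 hpr.1 le_rfl]
    have hcnt : ∀ w : String, S.count w = (s :: rest).count w :=
      fun w => (hperm.count_eq w).symm
    have hmem : ∀ w : String, w ∈ S ↔ w ∈ s :: rest := fun w => hperm.mem_iff.symm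
    by_cases hvs : v = s
    · subst hvs
      simp [hmem v |>.mpr (by simp), hcnt v, add_comm]
    · by_cases hvr : v ∈ rest
      · simp [hvs, Ne.symm hvs, hvr, (hmem v).mpr (by simp [hvr]), hcnt v]
      · have : v ∉ S := fun h => by
          rcases List.mem_cons.mp ((hmem v).mp h) with h | h
          · exact hvs h
          · exact hvr h
        simp [hvs, hvr, this, PySem.Dict.getD_empty]

-- B's emit loop builds exactly the qualifying first occurrences, in order
lemma insLoop (c : String → Int) :
    ∀ (xs : List String),
      ((xs.foldl (fun d s => if 2 ≤ c s then d.insert s (c s) else d)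
          (PySem.Dict.empty : PySem.Dict String Int)).items)
        = ((PySem.Set.ofList xs).filter (fun k => decide (2 ≤ c k))).map
            (fun k => (k, c k)) := by
  intro xs
  induction xs using List.reverseRecOn with
  | nil => simp [PySem.Dict.empty, PySem.Set.ofList]
  | append_singleton xs x ih =>
      rw [List.foldl_append, List.foldl_cons, List.foldl_nil]
      have hset : PySem.Set.ofList (xs ++ [x]) =
          PySem.Set.add (PySem.Set.ofList xs) x := by
        rw [PySem.Set.ofList_append, PySem.Set.update_cons, PySem.Set.update_nil]
      rw [hset]
      set d := xs.foldl (fun d s => if 2 ≤ c s then d.insert s (c s) else d)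
          (PySem.Dict.empty : PySem.Dict String Int) with hd
      have hkeys : d.keys = (((PySem.Set.ofList xs).filter
          (fun k => decide (2 ≤ c k))).map (fun k => (k, c k))).map Prod.fst := by
        simp only [PySem.Dict.keys, ih]
      by_cases hq : 2 ≤ c x
      · rw [if_pos hq]
        by_cases hx : x ∈ PySem.Set.ofList xs
        · have hmemL : x ∈ ((PySem.Set.ofList xs).filter (fun k => decide (2 ≤ c k))) :=
            List.mem_filter.mpr ⟨hx, by simpa using hq⟩
          have hcont : d.contains x = true := by
            rw [PySem.Dict.contains_iff_mem_keys, hkeys]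
            simp only [List.map_map, List.mem_map]
            exact ⟨x, hmemL, rfl⟩
          rw [PySem.Dict.items_insert_of_contains _ _ hcont, ih]
          have hadd : PySem.Set.add (PySem.Set.ofList xs) x = PySem.Set.ofList xs := by
            simp [PySem.Set.add, PySem.Set.contains, hx]
          rw [hadd]
          rw [List.map_map]
          apply List.map_congr_left
          intro k hk
          simp only [Function.comp_apply, beq_iff_eq]
          by_cases hkx : k = x
          · subst hkx; simp
          · simp [hkx]
        · have hcont : d.contains x = false := by
            rw [← Bool.not_eq_true, PySem.Dict.contains_iff_mem_keys, hkeys]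
            simp only [List.map_map, List.mem_map, not_exists]
            rintro k ⟨hk, hke⟩
            exact hx (by
              have : k = x := by simpa using hke
              exact this ▸ (List.mem_filter.mp hk).1)
          rw [PySem.Dict.items_insert_of_not_contains _ _ hcont, ih]
          have hadd : PySem.Set.add (PySem.Set.ofList xs) x =
              PySem.Set.ofList xs ++ [x] := by
            simp [PySem.Set.add, PySem.Set.contains, hx]
          rw [hadd, List.filter_append, List.map_append]
          simp [hq]
      · rw [if_neg hq]
        rw [ih]
        by_cases hx : x ∈ PySem.Set.ofList xs
        · have hadd : PySem.Set.add (PySem.Set.ofList xs) x = PySem.Set.ofList xs := by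
            simp [PySem.Set.add, PySem.Set.contains, hx]
          rw [hadd]
        · have hadd : PySem.Set.add (PySem.Set.ofList xs) x =
              PySem.Set.ofList xs ++ [x] := by
            simp [PySem.Set.add, PySem.Set.contains, hx]
          rw [hadd, List.filter_append]
          simp [hq]

lemma main_core (S : List String) :
    ((PySem.Dict.counter S).keys.foldl
        (fun d k => if d.getD k 0 < 2 then d.erase k else d)
        (PySem.Dict.counter S)).items
      = (S.foldl
          (fun d s =>
            if 2 ≤ (rlFlush ((PySem.List.sorted S (fun s => s) false).foldl rlStep
                  (PySem.Dict.empty, none, 0))).getD s 0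
            then d.insert s
              ((rlFlush ((PySem.List.sorted S (fun s => s) false).foldl rlStep
                  (PySem.Dict.empty, none, 0))).getD s 0)
            else d)
          PySem.Dict.empty).items := by
  -- A side: the deletion loop keeps exactly the count ≥ 2 items, in order
  have hnd : ((PySem.Dict.counter S (κ := String)).items.map Prod.fst).Nodup := by
    simpa [PySem.Dict.keys] using PySem.Dict.nodup_keys_counter S
  have hA := eraseLoop (PySem.Dict.counter S (κ := String)).items [] (by simp) hnd
  simp only [List.nil_append] at hA
  have hkeys : (PySem.Dict.counter S (κ := String)).keys =
      (PySem.Dict.counter S (κ := String)).items.map Prod.fst := rfl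
  have hmk : PySem.Dict.counter S (κ := String) =
      PySem.Dict.mk (PySem.Dict.counter S (κ := String)).items := rfl
  rw [hkeys]
  conv_lhs => rw [hmk]
  rw [hA]
  show (PySem.Dict.counter S (κ := String)).items.filter (fun p => !decide (p.2 < 2)) = _
  -- B side: the emit loop builds the qualifying first occurrences, in order
  rw [insLoop (fun s => (rlFlush ((PySem.List.sorted S (fun s => s) false).foldl rlStep
        (PySem.Dict.empty, none, 0))).getD s 0) S]
  rw [PySem.Dict.items_counter]
  rw [List.filter_map]
  have hfil : (PySem.Set.ofList S).filter
        ((fun p => !decide (p.2 < 2)) ∘ (fun k => (k, (S.count k : Int))))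
      = (PySem.Set.ofList S).filter
        (fun k => decide (2 ≤ (rlFlush ((PySem.List.sorted S (fun s => s) false).foldl rlStep
            (PySem.Dict.empty, none, 0))).getD k 0)) := by
    apply List.filter_congr
    intro k hk
    have hkS : k ∈ S := (PySem.Set.mem_ofList S k).mp hk
    rw [countsB_getD S k, if_pos hkS]
    simp only [Function.comp_apply]
    rw [← decide_not, decide_eq_decide]
    omega
  rw [hfil]
  apply List.map_congr_left
  intro k hk
  have hkS : k ∈ S := (PySem.Set.mem_ofList S k).mp (List.mem_filter.mp hk).1
  rw [countsB_getD S k, if_pos hkS]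

-- ===== VERDICT (by name: the statement is the Claim_ definition above) =====
set_option maxHeartbeats 1000000 in
theorem get_repetitions_spec : Claim_equal_get_repetitions := by
  intro input_str _
  unfold Spec_get_repetitions
  have h := main_core (subsList input_str)
  simp only [get_repetitions, get_repetitions_alt, substringsA_eq]
  exact h
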